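-- pv_equiv track=rewrite | github.com/daoout/3D-game-of-life | 3Dgol.py | generate_multiple_cubes_active_cells
-- ===== SOURCE A (Python) =====
-- def generate_multiple_cubes_active_cells(size, cube_size=5, positions=None):
--     """
--     生成多个立方体活细胞配置。
--     """
--     if positions is None:
--         positions = [
--             (size[0]//4, size[1]//4, size[2]//4),
--             (3*size[0]//4, 3*size[1]//4, 3*size[2]//4),
--             (size[0]//4, 3*size[1]//4, size[2]//4),
--             (3*size[0]//4, size[1]//4, 3*size[2]//4),
--         ]
--
--     active_cells = []
--
--     for pos in positions:
--         x_center, y_center, z_center = pos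
--         for x in range(x_center - cube_size//2, x_center + cube_size//2 + 1):
--             for y in range(y_center - cube_size//2, y_center + cube_size//2 + 1):
--                 for z in range(z_center - cube_size//2, z_center + cube_size//2 + 1):
--                     if 0 <= x < size[0] and 0 <= y < size[1] and 0 <= z < size[2]:
--                         active_cells.append((x, y, z))
--
--     return active_cells
-- ===== SOURCE B (Python) =====
-- def generate_multiple_cubes_active_cells(size, cube_size=5, positions=None):
--     """Flat enumeration: clamp each cube to the grid per axis, then decode a single
--     linear index k with // and % into (x, y, z) — no nested loops, no interior test."""
--     if positions is None:
--         positions = [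
--             (size[0]//4, size[1]//4, size[2]//4),
--             (3*size[0]//4, 3*size[1]//4, 3*size[2]//4),
--             (size[0]//4, 3*size[1]//4, size[2]//4),
--             (3*size[0]//4, size[1]//4, 3*size[2]//4),
--         ]
--     h = cube_size // 2
--     cells = []
--     for x_center, y_center, z_center in positions:
--         xlo = max(0, x_center - h); nx = min(size[0], x_center + h + 1) - xlo
--         ylo = max(0, y_center - h); ny = min(size[1], y_center + h + 1) - ylo
--         zlo = max(0, z_center - h); nz = min(size[2], z_center + h + 1) - zlo
--         if nx > 0 and ny > 0 and nz > 0: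
--             for k in range(nx * ny * nz):
--                 q = k // nz
--                 cells.append((xlo + q // ny, ylo + q % ny, zlo + k % nz))
--     return cells
-- ===== Notes on version B (the rewrite author's own statement) =====
-- stated objective: alternative
-- what changed: B replaces A's three nested loops with an interior bounds check by a single flat loop per cube: it clamps the cube to the grid per axis, then decodes one linear index k via // and % into (x, y, z), appending unconditionally.
import Mathlib
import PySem

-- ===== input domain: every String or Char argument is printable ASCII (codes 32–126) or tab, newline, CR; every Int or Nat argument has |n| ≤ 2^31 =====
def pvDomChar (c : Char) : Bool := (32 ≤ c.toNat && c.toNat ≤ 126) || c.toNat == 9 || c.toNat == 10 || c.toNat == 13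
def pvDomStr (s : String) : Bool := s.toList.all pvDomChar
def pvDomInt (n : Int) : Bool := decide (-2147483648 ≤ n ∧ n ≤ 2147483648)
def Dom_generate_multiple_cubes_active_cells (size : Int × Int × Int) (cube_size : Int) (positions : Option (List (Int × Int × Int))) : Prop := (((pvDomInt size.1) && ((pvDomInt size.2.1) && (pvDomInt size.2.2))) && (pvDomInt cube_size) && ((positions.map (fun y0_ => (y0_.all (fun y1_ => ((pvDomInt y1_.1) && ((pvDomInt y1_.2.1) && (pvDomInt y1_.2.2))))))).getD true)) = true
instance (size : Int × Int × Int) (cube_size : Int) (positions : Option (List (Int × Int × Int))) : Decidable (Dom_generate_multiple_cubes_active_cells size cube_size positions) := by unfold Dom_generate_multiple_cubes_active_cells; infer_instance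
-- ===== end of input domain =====

-- B clamps each cube to the grid per axis and then runs ONE flat loop per cube, decoding a
-- linear index with // and % into (x, y, z), instead of A's three nested loops with an
-- interior bounds check; objective: alternative (different enumeration mechanism).

-- ===== PORT A =====
def generate_multiple_cubes_active_cells (size : Int × Int × Int) (cube_size : Int) (positions : Option (List (Int × Int × Int))) : List (Int × Int × Int) :=
  let positions :=
    match positions with
    | none =>
        [(PySem.Int.floordiv size.1 4, PySem.Int.floordiv size.2.1 4, PySem.Int.floordiv size.2.2 4),
         (PySem.Int.floordiv (3 * size.1) 4, PySem.Int.floordiv (3 * size.2.1) 4, PySem.Int.floordiv (3 * size.2.2) 4),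
         (PySem.Int.floordiv size.1 4, PySem.Int.floordiv (3 * size.2.1) 4, PySem.Int.floordiv size.2.2 4),
         (PySem.Int.floordiv (3 * size.1) 4, PySem.Int.floordiv size.2.1 4, PySem.Int.floordiv (3 * size.2.2) 4)]
    | some p => p
  positions.foldl (fun acc pos =>
    (PySem.List.pyRange (pos.1 - PySem.Int.floordiv cube_size 2) (pos.1 + PySem.Int.floordiv cube_size 2 + 1) 1).foldl (fun acc x =>
      (PySem.List.pyRange (pos.2.1 - PySem.Int.floordiv cube_size 2) (pos.2.1 + PySem.Int.floordiv cube_size 2 + 1) 1).foldl (fun acc y =>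
        (PySem.List.pyRange (pos.2.2 - PySem.Int.floordiv cube_size 2) (pos.2.2 + PySem.Int.floordiv cube_size 2 + 1) 1).foldl (fun acc z =>
          if 0 ≤ x ∧ x < size.1 ∧ 0 ≤ y ∧ y < size.2.1 ∧ 0 ≤ z ∧ z < size.2.2 then
            acc ++ [(x, y, z)]
          else acc) acc) acc) acc) []

-- ===== PORT B =====
def generate_multiple_cubes_active_cells_alt (size : Int × Int × Int) (cube_size : Int) (positions : Option (List (Int × Int × Int))) : List (Int × Int × Int) :=
  let positions :=
    match positions with
    | none =>
        [(PySem.Int.floordiv size.1 4, PySem.Int.floordiv size.2.1 4, PySem.Int.floordiv size.2.2 4),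
         (PySem.Int.floordiv (3 * size.1) 4, PySem.Int.floordiv (3 * size.2.1) 4, PySem.Int.floordiv (3 * size.2.2) 4),
         (PySem.Int.floordiv size.1 4, PySem.Int.floordiv (3 * size.2.1) 4, PySem.Int.floordiv size.2.2 4),
         (PySem.Int.floordiv (3 * size.1) 4, PySem.Int.floordiv size.2.1 4, PySem.Int.floordiv (3 * size.2.2) 4)]
    | some p => p
  let h := PySem.Int.floordiv cube_size 2
  positions.foldl (fun acc pos =>
    let xlo := max 0 (pos.1 - h); let nx := min size.1 (pos.1 + h + 1) - xlo
    let ylo := max 0 (pos.2.1 - h); let ny := min size.2.1 (pos.2.1 + h + 1) - ylo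
    let zlo := max 0 (pos.2.2 - h); let nz := min size.2.2 (pos.2.2 + h + 1) - zlo
    if 0 < nx ∧ 0 < ny ∧ 0 < nz then
      (PySem.List.pyRange 0 (nx * ny * nz) 1).foldl (fun acc k =>
        let q := PySem.Int.floordiv k nz
        acc ++ [(xlo + PySem.Int.floordiv q ny, ylo + PySem.Int.mod q ny, zlo + PySem.Int.mod k nz)]) acc
    else acc) []

-- ===== PRECONDITION & SPEC =====
def Spec_generate_multiple_cubes_active_cells (size : Int × Int × Int) (cube_size : Int) (positions : Option (List (Int × Int × Int))) (out : List (Int × Int × Int)) : Prop := out = generate_multiple_cubes_active_cells_alt size cube_size positions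
instance (size : Int × Int × Int) (cube_size : Int) (positions : Option (List (Int × Int × Int))) (out : List (Int × Int × Int)) : Decidable (Spec_generate_multiple_cubes_active_cells size cube_size positions out) := by unfold Spec_generate_multiple_cubes_active_cells; infer_instance

-- ===== CLAIM (what is proved, stated in full; the proofs are below) =====
def Claim_equal_generate_multiple_cubes_active_cells : Prop := ∀ (size : Int × Int × Int) (cube_size : Int) (positions : Option (List (Int × Int × Int))), Dom_generate_multiple_cubes_active_cells size cube_size positions → Spec_generate_multiple_cubes_active_cells size cube_size positions (generate_multiple_cubes_active_cells size cube_size positions)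

-- ===== LEMMAS AND PROOFS =====

-- a foldl step that conditionally appends a block, rewritten so the append is unconditional
theorem pv_if_append_list {α : Type} (acc : List α) (c : Prop) [Decidable c] (L : List α) :
    (if c then acc ++ L else acc) = acc ++ (if c then L else []) := by
  split_ifs <;> simp

theorem pv_flatMap_congr {α β : Type} {l : List α} {f g : α → List β}
    (h : ∀ x ∈ l, f x = g x) : l.flatMap f = l.flatMap g := by
  induction l with
  | nil => rfl
  | cons a l ih =>
    simp only [List.flatMap_cons, h a (List.mem_cons_self), ih (fun x hx => h x (List.mem_cons_of_mem a hx))]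

-- clamping a range does not change a flatMap whose function vanishes outside [0, s)
theorem pv_clamp_flatMap {α : Type} (a b s : Int) (g : Int → List α)
    (h : ∀ y : Int, ¬(0 ≤ y ∧ y < s) → g y = []) :
    (PySem.List.pyRange a b 1).flatMap g
      = (PySem.List.pyRange (max 0 a) (min s b) 1).flatMap g := by
  by_cases hlt : max 0 a < min s b
  · rw [PySem.List.pyRange_one_append a (max 0 a) b (by omega) (by omega),
        PySem.List.pyRange_one_append (max 0 a) (min s b) b (by omega) (by omega)]
    simp only [List.flatMap_append]
    have h1 : (PySem.List.pyRange a (max 0 a) 1).flatMap g = [] := by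
      rw [List.flatMap_eq_nil_iff]
      intro y hy
      have := PySem.List.mem_pyRange_one.mp hy
      exact h y (by omega)
    have h2 : (PySem.List.pyRange (min s b) b 1).flatMap g = [] := by
      rw [List.flatMap_eq_nil_iff]
      intro y hy
      have := PySem.List.mem_pyRange_one.mp hy
      exact h y (by omega)
    rw [h1, h2]; simp
  · rw [PySem.List.pyRange_one_eq_nil (by omega : min s b ≤ max 0 a)]
    simp only [List.flatMap_nil]
    rw [List.flatMap_eq_nil_iff]
    intro y hy
    have := PySem.List.mem_pyRange_one.mp hy
    exact h y (by omega)

-- A per position equals the clamped triple enumeration (generate-then-filter = intersect-then-generate)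
theorem pv_pos_eq (s1 s2 s3 h2 p1 p2 p3 : Int) :
    (PySem.List.pyRange (p1 - h2) (p1 + h2 + 1) 1).flatMap (fun x =>
      (PySem.List.pyRange (p2 - h2) (p2 + h2 + 1) 1).flatMap (fun y =>
        (PySem.List.pyRange (p3 - h2) (p3 + h2 + 1) 1).flatMap (fun z =>
          if 0 ≤ x ∧ x < s1 ∧ 0 ≤ y ∧ y < s2 ∧ 0 ≤ z ∧ z < s3 then [(x, y, z)] else [])))
    = (PySem.List.pyRange (max 0 (p1 - h2)) (min s1 (p1 + h2 + 1)) 1).flatMap (fun x =>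
        (PySem.List.pyRange (max 0 (p2 - h2)) (min s2 (p2 + h2 + 1)) 1).flatMap (fun y =>
          (PySem.List.pyRange (max 0 (p3 - h2)) (min s3 (p3 + h2 + 1)) 1).flatMap (fun z =>
            [(x, y, z)]))) := by
  rw [pv_clamp_flatMap (p1 - h2) (p1 + h2 + 1) s1 _
      (by intro x hx
          rw [List.flatMap_eq_nil_iff]; intro y _
          rw [List.flatMap_eq_nil_iff]; intro z _
          rw [if_neg (by tauto)])]
  apply pv_flatMap_congr
  intro x hx
  have hxr := PySem.List.mem_pyRange_one.mp hx
  rw [pv_clamp_flatMap (p2 - h2) (p2 + h2 + 1) s2 _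
      (by intro y hy
          rw [List.flatMap_eq_nil_iff]; intro z _
          rw [if_neg (by tauto)])]
  apply pv_flatMap_congr
  intro y hy
  have hyr := PySem.List.mem_pyRange_one.mp hy
  rw [pv_clamp_flatMap (p3 - h2) (p3 + h2 + 1) s3 _
      (by intro z hz; rw [if_neg (by tauto)])]
  apply pv_flatMap_congr
  intro z hz
  have hzr := PySem.List.mem_pyRange_one.mp hz
  rw [if_pos (by omega)]

-- unrolling one block of a flat divmod enumeration (Nat)
theorem pv_flat_two {α : Type} (m n : Nat) (hn : 0 < n) (f : Nat → Nat → List α) :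
    (List.range (m * n)).flatMap (fun k => f (k / n) (k % n))
    = (List.range m).flatMap (fun i => (List.range n).flatMap (fun j => f i j)) := by
  induction m with
  | zero => simp
  | succ m ih =>
    rw [Nat.succ_mul, List.range_add, List.flatMap_append, ih, List.range_succ,
        List.flatMap_append, List.flatMap_map]
    congr 1
    · simp only [List.flatMap_cons, List.flatMap_nil, List.append_nil]
      apply pv_flatMap_congr
      intro j hj
      have hjn : j < n := List.mem_range.mp hj
      have hd : (m * n + j) / n = m := by
        rw [Nat.add_comm, Nat.add_mul_div_right _ _ hn, Nat.div_eq_of_lt hjn]; omega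
      have hm : (m * n + j) % n = j := by
        rw [Nat.add_comm, Nat.add_mul_mod_self_right, Nat.mod_eq_of_lt hjn]
      simp [hd, hm]

-- flat divmod decoding of a 3-box, all in Nat
theorem pv_flat_three {α : Type} (a b c : Nat) (hb : 0 < b) (hc : 0 < c) (F : Nat → Nat → Nat → List α) :
    (List.range (a * b * c)).flatMap (fun k => F (k / c / b) (k / c % b) (k % c))
    = (List.range a).flatMap (fun i =>
        (List.range b).flatMap (fun j =>
          (List.range c).flatMap (fun l => F i j l))) := by
  rw [pv_flat_two (a * b) c hc (fun q l => F (q / b) (q % b) l),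
      pv_flat_two a b hb (fun i j => (List.range c).flatMap (fun l => F i j l))]

-- flat linear-index decoding equals the nested clamped enumeration (Int version)
theorem pv_flat_eq (xlo ylo zlo : Int) (a b c : Nat) (hb : 0 < b) (hc : 0 < c) :
    (PySem.List.pyRange 0 ((a : Int) * (b : Int) * (c : Int)) 1).flatMap (fun k =>
       [(xlo + PySem.Int.floordiv (PySem.Int.floordiv k c) b,
         ylo + PySem.Int.mod (PySem.Int.floordiv k c) b,
         zlo + PySem.Int.mod k c)])
    = (PySem.List.pyRange xlo (xlo + a) 1).flatMap (fun x =>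
        (PySem.List.pyRange ylo (ylo + b) 1).flatMap (fun y =>
          (PySem.List.pyRange zlo (zlo + c) 1).flatMap (fun z => [(x, y, z)]))) := by
  rw [PySem.List.pyRange_one 0, PySem.List.pyRange_one xlo, PySem.List.pyRange_one ylo,
      PySem.List.pyRange_one zlo]
  have h1 : ((a : Int) * b * c - 0).toNat = a * b * c := by
    have : ((a : Int) * b * c - 0) = ((a * b * c : Nat) : Int) := by push_cast; ring
    rw [this, Int.toNat_natCast]
  have h2 : (xlo + a - xlo).toNat = a := by omega
  have h3 : (ylo + b - ylo).toNat = b := by omega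
  have h4 : (zlo + c - zlo).toNat = c := by omega
  rw [h1, h2, h3, h4]
  simp only [List.flatMap_map]
  have lhs_eq :
      (List.range (a * b * c)).flatMap
        (fun k : Nat =>
          [(xlo + PySem.Int.floordiv (PySem.Int.floordiv ((0 : Int) + (k : Int)) c) b,
            ylo + PySem.Int.mod (PySem.Int.floordiv ((0 : Int) + (k : Int)) c) b,
            zlo + PySem.Int.mod ((0 : Int) + (k : Int)) c)])
      = (List.range (a * b * c)).flatMap (fun k : Nat =>
          [((xlo + ((k / c / b : Nat) : Int), ylo + ((k / c % b : Nat) : Int),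
             zlo + ((k % c : Nat) : Int)) : Int × Int × Int)]) := by
    apply pv_flatMap_congr
    intro k _
    simp only [zero_add, PySem.Int.floordiv_natCast, PySem.Int.mod_natCast]
  rw [lhs_eq,
      pv_flat_three a b c hb hc (fun i j l =>
        [((xlo + (i : Int), ylo + (j : Int), zlo + (l : Int)) : Int × Int × Int)])]

-- per-position agreement: A's filtered cube equals B's flat decoded block
theorem pv_pos_flat (s1 s2 s3 h2 p1 p2 p3 : Int) :
    (PySem.List.pyRange (p1 - h2) (p1 + h2 + 1) 1).flatMap (fun x =>
      (PySem.List.pyRange (p2 - h2) (p2 + h2 + 1) 1).flatMap (fun y =>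
        (PySem.List.pyRange (p3 - h2) (p3 + h2 + 1) 1).flatMap (fun z =>
          if 0 ≤ x ∧ x < s1 ∧ 0 ≤ y ∧ y < s2 ∧ 0 ≤ z ∧ z < s3 then [(x, y, z)] else [])))
    = (let xlo := max 0 (p1 - h2); let nx := min s1 (p1 + h2 + 1) - xlo
       let ylo := max 0 (p2 - h2); let ny := min s2 (p2 + h2 + 1) - ylo
       let zlo := max 0 (p3 - h2); let nz := min s3 (p3 + h2 + 1) - zlo
       if 0 < nx ∧ 0 < ny ∧ 0 < nz then
         (PySem.List.pyRange 0 (nx * ny * nz) 1).flatMap (fun k =>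
           let q := PySem.Int.floordiv k nz
           [(xlo + PySem.Int.floordiv q ny, ylo + PySem.Int.mod q ny, zlo + PySem.Int.mod k nz)])
       else []) := by
  rw [pv_pos_eq]
  set xlo := max 0 (p1 - h2) with hxlo
  set ylo := max 0 (p2 - h2) with hylo
  set zlo := max 0 (p3 - h2) with hzlo
  set xhi := min s1 (p1 + h2 + 1) with hxhi
  set yhi := min s2 (p2 + h2 + 1) with hyhi
  set zhi := min s3 (p3 + h2 + 1) with hzhi
  show _ = if 0 < xhi - xlo ∧ 0 < yhi - ylo ∧ 0 < zhi - zlo then _ else _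
  by_cases hpos : 0 < xhi - xlo ∧ 0 < yhi - ylo ∧ 0 < zhi - zlo
  · rw [if_pos hpos]
    obtain ⟨hx, hy, hz⟩ := hpos
    have ha : xhi = xlo + ((xhi - xlo).toNat : Int) := by omega
    have hbEq : yhi = ylo + ((yhi - ylo).toNat : Int) := by omega
    have hcEq : zhi = zlo + ((zhi - zlo).toNat : Int) := by omega
    have hb' : 0 < (yhi - ylo).toNat := by omega
    have hc' : 0 < (zhi - zlo).toNat := by omega
    rw [ha, hbEq, hcEq]
    simp only [add_sub_cancel_left]
    exact (pv_flat_eq xlo ylo zlo (xhi - xlo).toNat (yhi - ylo).toNat (zhi - zlo).toNat hb' hc').symm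
  · rw [if_neg hpos]
    rw [List.flatMap_eq_nil_iff]
    intro x hx
    have hxr := PySem.List.mem_pyRange_one.mp hx
    rw [List.flatMap_eq_nil_iff]
    intro y hy
    have hyr := PySem.List.mem_pyRange_one.mp hy
    rw [List.flatMap_eq_nil_iff]
    intro z hz
    have hzr := PySem.List.mem_pyRange_one.mp hz
    omega

-- ===== VERDICT (by name: the statement is the Claim_ definition above) =====
theorem generate_multiple_cubes_active_cells_spec : Claim_equal_generate_multiple_cubes_active_cells := by
  intro size cube_size positions _
  unfold Spec_generate_multiple_cubes_active_cells
  unfold generate_multiple_cubes_active_cells generate_multiple_cubes_active_cells_alt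
  simp only [pv_if_append_list, PySem.List.foldl_append_eq_flatMap, List.nil_append]
  apply pv_flatMap_congr
  intro pos _
  exact pv_pos_flat size.1 size.2.1 size.2.2 (PySem.Int.floordiv cube_size 2) pos.1 pos.2.1 pos.2.2
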